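-- pv_equiv track=rewrite | github.com/thirupathireddy665/crossbeam | src/bustle_generated_properties.py | is_true
-- ===== SOURCE A (Python) =====
-- AllTrue = -1
--
-- Mixed = 0
--
-- AllFalse = 1
--
-- def is_true(inputs):
--     is_true_present = False
--     is_false_present = False
--     for program_input in inputs:
--         if program_input:
--             is_true_present = True
--         else:
--             is_false_present = True
--
--     if is_true_present and is_false_present:
--         return Mixed
--     elif is_true_present:
--         return AllTrue
--     else:
--         return AllFalse
-- ===== SOURCE B (Python) =====
-- AllTrue = -1
--
-- Mixed = 0
--
-- AllFalse = 1
--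
-- def is_true(inputs):
--     vals = [bool(x) for x in inputs]
--     t = sum(vals)
--     if t == 0:
--         return AllFalse
--     if t == len(vals):
--         return AllTrue
--     return Mixed
-- ===== Notes on version B (the rewrite author's own statement) =====
-- stated objective: alternative
-- what changed: B counts the truthy elements and classifies by comparing the count to 0 and to the length (AllFalse checked first), instead of A's loop accumulating two presence flags and branching on them.
import Mathlib
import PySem

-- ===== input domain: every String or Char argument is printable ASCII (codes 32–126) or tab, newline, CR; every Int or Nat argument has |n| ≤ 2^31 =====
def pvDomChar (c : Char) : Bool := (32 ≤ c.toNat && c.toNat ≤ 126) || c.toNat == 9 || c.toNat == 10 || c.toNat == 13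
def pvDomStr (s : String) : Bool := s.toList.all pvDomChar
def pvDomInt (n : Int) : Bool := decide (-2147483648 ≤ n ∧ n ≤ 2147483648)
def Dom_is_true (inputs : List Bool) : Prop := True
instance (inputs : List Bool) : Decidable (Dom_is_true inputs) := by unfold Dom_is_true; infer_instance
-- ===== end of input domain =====

-- B classifies by counting truthy elements and comparing the count to 0 and to the length, instead of A's two presence flags; objective: alternative.


-- ===== PORT A =====
-- A's loop: fold over inputs accumulating (is_true_present, is_false_present), then branch.
def is_true (inputs : List Bool) : Int :=
  let st := inputs.foldl
    (fun (acc : Bool × Bool) program_input =>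
      if program_input then (true, acc.2) else (acc.1, true))
    (false, false)
  if st.1 && st.2 then 0        -- Mixed
  else if st.1 then -1          -- AllTrue
  else 1                        -- AllFalse

-- ===== PORT B =====
-- B: t = sum of 1 per truthy element; AllFalse if t = 0, AllTrue if t = length, else Mixed.
def is_true_alt (inputs : List Bool) : Int :=
  let vals := inputs.map (fun x => if x then (1 : Int) else 0)
  let t := vals.sum
  if t = 0 then 1
  else if t = (vals.length : Int) then -1
  else 0

-- ===== PRECONDITION & SPEC =====
def Spec_is_true (inputs : List Bool) (out : Int) : Prop := out = is_true_alt inputs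
instance (inputs : List Bool) (out : Int) : Decidable (Spec_is_true inputs out) := by unfold Spec_is_true; infer_instance

-- ===== CLAIM (what is proved, stated in full; the proofs are below) =====
def Claim_equal_is_true : Prop := ∀ (inputs : List Bool), Dom_is_true inputs → Spec_is_true inputs (is_true inputs)

-- ===== LEMMAS AND PROOFS =====

-- A's fold computes (any, not all) from any starting flags.
theorem is_true_fold_eq (inputs : List Bool) (a b : Bool) :
    inputs.foldl
      (fun (acc : Bool × Bool) program_input =>
        if program_input then (true, acc.2) else (acc.1, true))
      (a, b) = (a || inputs.any id, b || !(inputs.all id)) := by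
  induction inputs generalizing a b with
  | nil => simp
  | cons x xs ih =>
    cases x <;> simp [List.foldl, ih]

-- B's sum is the count of true elements, as an Int.
theorem sum_map_eq_count (inputs : List Bool) :
    (inputs.map (fun x => if x then (1 : Int) else 0)).sum = (inputs.count true : Int) := by
  induction inputs with
  | nil => simp
  | cons x xs ih =>
    cases x <;> simp [List.count_cons, ih] <;> ring

theorem count_eq_zero_iff_not_any (inputs : List Bool) :
    (inputs.count true = 0) ↔ inputs.any id = false := by
  simp [List.count_eq_zero, List.any_eq_false]

theorem count_eq_length_iff_all (inputs : List Bool) :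
    (inputs.count true = inputs.length) ↔ inputs.all id = true := by
  rw [List.count_eq_length, List.all_eq_true]
  constructor
  · intro h x hx; simpa using (h x hx).symm
  · intro h x hx; simpa using h x hx

-- ===== VERDICT (by name: the statement is the Claim_ definition above) =====
theorem is_true_spec : Claim_equal_is_true := by
  intro inputs _
  unfold Spec_is_true is_true is_true_alt
  rw [is_true_fold_eq]
  simp only [Bool.false_or, List.length_map, sum_map_eq_count]
  by_cases hz : inputs.count true = 0
  · have hany : inputs.any id = false := (count_eq_zero_iff_not_any inputs).mp hz
    simp [hz, hany]
  · have hany : inputs.any id = true := by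
      cases h : inputs.any id
      · exact absurd ((count_eq_zero_iff_not_any inputs).mpr h) hz
      · rfl
    by_cases hl : inputs.count true = inputs.length
    · have hall : inputs.all id = true := (count_eq_length_iff_all inputs).mp hl
      simp [hany, hall]
      omega
    · have hall : inputs.all id = false := by
        cases h : inputs.all id
        · rfl
        · exact absurd ((count_eq_length_iff_all inputs).mpr h) hl
      simp [hany, hall]
      omega
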